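-- pv_equiv track=rewrite | github.com/Suraj1199/CompetetiveCoding_Solutions | HackerRank/Jim_and_the_Skyscrapers.py | solve
-- ===== SOURCE A (Python) =====
-- def solve(arr):
--     arr.append(2**64)
--     idx, routes = 0, 0
--     stack, m = [], {}
--     while idx < len(arr):
--         if stack == [] or arr[idx] <= stack[-1]:
--             stack.append(arr[idx])
--             if arr[idx] in m:
--                 m[arr[idx]] += 1
--             else:
--                 m[arr[idx]] = 1
--             idx += 1
--         else:
--             top = stack.pop()
--             if top in m and top < arr[idx]:
--                 routes += m[top] * (m[top] - 1)
--                 del m[top]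
--     return(routes)
-- ===== SOURCE B (Python) =====
-- def solve(arr):
--     arr.append(2**64)  # same in-place sentinel append as the original
--     stack = []  # entries [height, count]; run-length encoded monotonic stack
--     routes = 0
--     for h in arr:
--         while stack and stack[-1][0] < h:
--             stack.pop()
--         if stack and stack[-1][0] == h:
--             routes += 2 * stack[-1][1]
--             stack[-1][1] += 1
--         else:
--             stack.append([h, 1])
--     return routes
-- ===== Notes on version B (the rewrite author's own statement) =====
-- stated objective: simpler
-- what changed: Replaces the index-driven while loop with its auxiliary height->count dict (popped heights deleted, pairs added as count*(count-1) at pop time) by a single for-loop over a run-length-encoded monotonic stack of [height,count] pairs, accumulating routes incrementally as 2*count when an equal height is merged; no dict and no per-element index/re-push bookkeeping (constant-factor win).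
import Mathlib
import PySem

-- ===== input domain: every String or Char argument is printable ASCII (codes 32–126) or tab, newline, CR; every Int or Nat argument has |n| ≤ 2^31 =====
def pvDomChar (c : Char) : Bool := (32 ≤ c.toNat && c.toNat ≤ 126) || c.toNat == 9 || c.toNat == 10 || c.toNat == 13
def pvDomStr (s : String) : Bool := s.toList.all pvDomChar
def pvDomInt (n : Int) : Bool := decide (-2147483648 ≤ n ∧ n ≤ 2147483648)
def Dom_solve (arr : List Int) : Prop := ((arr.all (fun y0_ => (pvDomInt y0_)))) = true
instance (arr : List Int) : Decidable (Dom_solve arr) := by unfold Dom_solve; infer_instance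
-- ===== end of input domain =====

-- B is a structurally different implementation: one pass over the array with a run-length-encoded
-- monotonic stack of (height, count) pairs, no auxiliary dict; pairs are counted incrementally.
-- Both A and B mutate the Python argument identically (arr.append(2**64)); equivalence here is about the return value.

-- ===== PORT A =====
-- `if a in m: m[a] += 1 else: m[a] = 1` (m[a] read is total because of the contains guard)
def pushM (m : PySem.Dict Int Int) (a : Int) : PySem.Dict Int Int :=
  if m.contains a then m.insert a (m.getD a 0 + 1) else m.insert a 1

-- A's while loop: `rem` is arr[idx:] (idx advances exactly when rem loses its head);
-- the Python stack grows/pops at its end, transcribed head-first (head = stack[-1]).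
def solveA_loop : List Int → List Int → PySem.Dict Int Int → Int → Int
  | [], _, _, routes => routes
  | a :: t, [], m, routes => solveA_loop t [a] (pushM m a) routes
  | a :: t, top :: rest, m, routes =>
    if a ≤ top then
      solveA_loop t (a :: top :: rest) (pushM m a) routes
    else if m.contains top ∧ top < a then
      -- m[top] read via getD: the contains guard makes it total
      solveA_loop (a :: t) rest (m.erase top) (routes + m.getD top 0 * (m.getD top 0 - 1))
    else
      solveA_loop (a :: t) rest m routes
  termination_by rem stack _ _ => (rem.length, stack.length)

def solve (arr : List Int) : Int :=
  solveA_loop (arr ++ [2 ^ 64]) [] PySem.Dict.empty 0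

-- ===== PORT B =====
-- B's inner `while stack and stack[-1][0] < h: stack.pop()` (stack head-first, head = stack[-1])
def popLess (h : Int) : List (Int × Int) → List (Int × Int)
  | [] => []
  | p :: rest => if p.1 < h then popLess h rest else p :: rest

-- B's for-loop over arr (after the sentinel append)
def solveB_loop : List Int → List (Int × Int) → Int → Int
  | [], _, routes => routes
  | h :: t, stack, routes =>
    match popLess h stack with
    | (hh, c) :: rest =>
      if hh = h then solveB_loop t ((hh, c + 1) :: rest) (routes + 2 * c)
      else solveB_loop t ((h, 1) :: (hh, c) :: rest) routes
    | [] => solveB_loop t [(h, 1)] routes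

def solve_alt (arr : List Int) : Int :=
  solveB_loop (arr ++ [2 ^ 64]) [] 0

-- ===== PRECONDITION & SPEC =====
def Spec_solve (arr : List Int) (out : Int) : Prop := out = solve_alt arr
instance (arr : List Int) (out : Int) : Decidable (Spec_solve arr out) := by unfold Spec_solve; infer_instance

-- ===== CLAIM (what is proved, stated in full; the proofs are below) =====
def Claim_equal_solve : Prop := ∀ (arr : List Int), Dom_solve arr → Spec_solve arr (solve arr)

-- ===== LEMMAS AND PROOFS =====

-- A's stack is the run-length-decoding of B's stack
def flatS (bs : List (Int × Int)) : List Int := bs.flatMap (fun p => List.replicate p.2.toNat p.1)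

-- pairs still pending on B's stack that A has not yet added to routes
def pend (bs : List (Int × Int)) : Int := (bs.map (fun p => p.2 * (p.2 - 1))).sum

-- association lookup in B's stack
def lookB (bs : List (Int × Int)) (h : Int) : Option Int := (bs.find? (fun p => p.1 == h)).map (·.2)

-- coupling invariant between A's (stack, m) and B's stack
def StInv (bs : List (Int × Int)) (stack : List Int) (m : PySem.Dict Int Int) : Prop :=
  stack = flatS bs ∧ (∀ p ∈ bs, 1 ≤ p.2) ∧ (∀ h, m.get? h = lookB bs h) ∧
    List.Pairwise (fun p q : Int × Int => p.1 < q.1) bs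

theorem get?_erase (m : PySem.Dict Int Int) (k x : Int) :
    (m.erase k).get? x = if x = k then none else m.get? x := by
  obtain ⟨items⟩ := m
  simp only [PySem.Dict.erase, PySem.Dict.get?]
  induction items with
  | nil => simp
  | cons p rest ih =>
    by_cases hpk : p.1 = k
    · rw [List.filter_cons, if_neg (by simp [hpk]), ih]
      by_cases hxk : x = k
      · simp [hxk]
      · rw [if_neg hxk, if_neg hxk, List.find?_cons,
          show (p.1 == x) = false from beq_eq_false_iff_ne.mpr (by omega)]
    · rw [List.filter_cons, if_pos (by simp [hpk])]
      by_cases hpx : p.1 = x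
      · rw [if_neg (by omega)]
        simp [hpx]
      · rw [List.find?_cons, show (p.1 == x) = false from beq_eq_false_iff_ne.mpr hpx,
          List.find?_cons, show (p.1 == x) = false from beq_eq_false_iff_ne.mpr hpx, ih]

theorem contains_get (m : PySem.Dict Int Int) (k : Int) :
    m.contains k = (m.get? k).isSome := PySem.Dict.contains_eq_isSome_get? m k

theorem lookB_nil (x : Int) : lookB [] x = none := rfl

theorem lookB_cons (h c : Int) (rest : List (Int × Int)) (x : Int) :
    lookB ((h, c) :: rest) x = if h = x then some c else lookB rest x := by
  simp only [lookB, List.find?_cons]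
  by_cases hx : h = x
  · simp [hx]
  · rw [show ((h, c).1 == x) = false from beq_eq_false_iff_ne.mpr hx, if_neg hx]

theorem lookB_eq_none (bs : List (Int × Int)) (x : Int) (hall : ∀ p ∈ bs, x < p.1) :
    lookB bs x = none := by
  induction bs with
  | nil => rfl
  | cons q r ih =>
    rw [lookB_cons, if_neg (by have := hall q (List.mem_cons_self ..); omega)]
    exact ih (fun p hp => hall p (List.mem_cons_of_mem _ hp))

theorem popLess_sublist (a : Int) (bs : List (Int × Int)) : (popLess a bs).Sublist bs := by
  induction bs with
  | nil => simp [popLess]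
  | cons p rest ih =>
    simp only [popLess]
    split
    · exact ih.trans (List.sublist_cons_self _ _)
    · exact List.Sublist.refl _

theorem popLess_eq_nil (a : Int) (bs : List (Int × Int)) (h : ∀ p ∈ bs, p.1 < a) :
    popLess a bs = [] := by
  induction bs with
  | nil => rfl
  | cons p rest ih =>
    simp only [popLess, if_pos (h p (List.mem_cons_self ..))]
    exact ih (fun q hq => h q (List.mem_cons_of_mem _ hq))

theorem popLess_head_ge (a : Int) (bs rest : List (Int × Int)) (p : Int × Int)
    (h : popLess a bs = p :: rest) : a ≤ p.1 := by
  induction bs with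
  | nil => simp [popLess] at h
  | cons q bs' ih =>
    simp only [popLess] at h
    split at h
    · exact ih h
    · cases h; omega

-- popping the tail of a run whose dict entry is already deleted: A just pops, nothing else changes
theorem runPop (k : Nat) (h a : Int) (t s : List Int) (m : PySem.Dict Int Int) (routes : Int)
    (hlt : h < a) (hm : m.get? h = none) :
    solveA_loop (a :: t) (List.replicate k h ++ s) m routes = solveA_loop (a :: t) s m routes := by
  induction k with
  | zero => rfl
  | succ n ih =>
    rw [List.replicate_succ, List.cons_append, solveA_loop]
    rw [if_neg (by omega), if_neg (by simp [contains_get, hm])]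
    exact ih

-- the pop phase of A, processing element a, tracked against popLess on B's stack
theorem popPhase (bs : List (Int × Int)) (a : Int) (t stack : List Int)
    (m : PySem.Dict Int Int) (rA : Int) (hInv : StInv bs stack m) :
    ∃ m', StInv (popLess a bs) (flatS (popLess a bs)) m' ∧
      solveA_loop (a :: t) stack m rA
        = solveA_loop (a :: t) (flatS (popLess a bs)) m' (rA + (pend bs - pend (popLess a bs))) := by
  induction bs generalizing stack m rA with
  | nil =>
    obtain ⟨hs, _, hm, _⟩ := hInv
    exact ⟨m, ⟨rfl, by simp [popLess], by simpa [popLess] using hm, by simp [popLess]⟩,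
      by simp [popLess, pend, hs, flatS]⟩
  | cons p rest ih =>
    obtain ⟨hv, c⟩ := p
    obtain ⟨hs, hcnt, hm, hpw⟩ := hInv
    have hc1 : 1 ≤ c := hcnt _ (List.mem_cons_self ..)
    by_cases hlt : hv < a
    · -- this run gets popped
      have hs' : stack = hv :: (List.replicate (c.toNat - 1) hv ++ flatS rest) := by
        rw [hs]; simp only [flatS, List.flatMap_cons]
        rw [show c.toNat = (c.toNat - 1) + 1 by omega, List.replicate_succ]; simp
      have hmh : m.get? hv = some c := by rw [hm, lookB_cons]; simp
      have hgd : m.getD hv 0 = c := by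
        rw [PySem.Dict.getD_eq_get?_getD, hmh]; rfl
      have hstep : solveA_loop (a :: t) stack m rA
          = solveA_loop (a :: t) (flatS rest) (m.erase hv) (rA + c * (c - 1)) := by
        rw [hs', solveA_loop, if_neg (by omega),
          if_pos ⟨by simp [contains_get, hmh], hlt⟩, hgd]
        exact runPop _ _ _ _ _ _ _ hlt (by simp [get?_erase])
      have hrest : ∀ q ∈ rest, hv < q.1 := (List.pairwise_cons.mp hpw).1
      have hInv' : StInv rest (flatS rest) (m.erase hv) := by
        refine ⟨rfl, fun q hq => hcnt q (List.mem_cons_of_mem _ hq), fun x => ?_,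
          hpw.sublist (List.sublist_cons_self _ _)⟩
        rw [get?_erase]
        by_cases hx : x = hv
        · rw [if_pos hx, hx, lookB_eq_none rest hv hrest]
        · rw [if_neg hx, hm, lookB_cons, if_neg (by omega)]
      obtain ⟨m', hI, heq⟩ := ih (flatS rest) (m.erase hv) (rA + c * (c - 1)) hInv'
      refine ⟨m', by simpa [popLess, hlt] using hI, ?_⟩
      rw [hstep, heq]
      simp only [popLess, if_pos hlt, pend, List.map_cons, List.sum_cons]
      ring_nf
    · -- pop phase stops here
      exact ⟨m, ⟨by simp [popLess, hlt], by simp only [popLess, if_neg hlt]; exact hcnt,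
        by simp only [popLess, if_neg hlt]; exact hm, by simp only [popLess, if_neg hlt]; exact hpw⟩,
        by simp [popLess, hlt, hs]⟩

-- main lockstep lemma: A's loop and B's loop agree on l ++ [S] when S dominates everything
theorem mainLoop (S : Int) (l : List Int) :
    ∀ (bs : List (Int × Int)) (stack : List Int) (m : PySem.Dict Int Int) (rA rB : Int),
    StInv bs stack m → rB = rA + pend bs → (∀ x ∈ l, x < S) → (∀ p ∈ bs, p.1 < S) →
    solveA_loop (l ++ [S]) stack m rA = solveB_loop (l ++ [S]) bs rB := by
  induction l with
  | nil =>
    intro bs stack m rA rB hInv hr _ hbS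
    obtain ⟨m', hI', heq⟩ := popPhase bs S [] stack m rA hInv
    have hnil : popLess S bs = [] := popLess_eq_nil S bs hbS
    rw [List.nil_append, heq, hnil]
    obtain ⟨_, _, hm', _⟩ := hI'
    simp only [hnil] at hm' ⊢
    rw [show flatS ([] : List (Int × Int)) = [] from rfl, solveA_loop, solveA_loop,
      solveB_loop, hnil, solveB_loop]
    simp [pend, hr]
  | cons a t ih =>
    intro bs stack m rA rB hInv hr hlS hbS
    obtain ⟨m', hI', heq⟩ := popPhase bs a (t ++ [S]) stack m rA hInv
    obtain ⟨_, hcnt', hm', hpw'⟩ := hI'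
    have haS : a < S := hlS a (List.mem_cons_self ..)
    have hbS' : ∀ p ∈ popLess a bs, p.1 < S :=
      fun p hp => hbS p ((popLess_sublist a bs).mem hp)
    rw [List.cons_append, heq, solveB_loop]
    set rA2 := rA + (pend bs - pend (popLess a bs)) with hrA2
    have hr2 : rB = rA2 + pend (popLess a bs) := by rw [hrA2]; omega
    cases hbs2 : popLess a bs with
    | nil =>
      -- A pushes a on the empty stack; B pushes (a,1)
      rw [hbs2] at heq hm' hr2 hbS'
      rw [show flatS ([] : List (Int × Int)) = [] from rfl, solveA_loop]
      have hma : m'.get? a = none := by rw [hm']; rfl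
      have hpush : pushM m' a = m'.insert a 1 := by
        rw [pushM, if_neg (by simp [contains_get, hma])]
      rw [hpush]
      refine ih [(a, 1)] [a] (m'.insert a 1) rA2 rB ⟨?_, ?_, ?_, ?_⟩ ?_
        (fun x hx => hlS x (List.mem_cons_of_mem _ hx)) ?_
      · simp [flatS]
      · simp
      · intro x
        rw [PySem.Dict.get?_insert, lookB_cons]
        by_cases hxa : x = a
        · simp [hxa]
        · rw [if_neg hxa, if_neg (by omega), hm', lookB_nil]
      · simp
      · simp [pend] at hr2 ⊢; omega
      · simp [haS]
    | cons p rest =>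
      obtain ⟨hh, c⟩ := p
      rw [hbs2] at heq hm' hr2 hbS' hcnt' hpw'
      have hc1 : 1 ≤ c := hcnt' _ (List.mem_cons_self ..)
      have hge : a ≤ hh := popLess_head_ge a bs rest (hh, c) hbs2
      have hflat : flatS ((hh, c) :: rest) = hh :: (List.replicate (c.toNat - 1) hh ++ flatS rest) := by
        simp only [flatS, List.flatMap_cons]
        rw [show c.toNat = (c.toNat - 1) + 1 by omega, List.replicate_succ]; simp
      show _ = if hh = a then solveB_loop (t ++ [S]) ((hh, c + 1) :: rest) (rB + 2 * c)
        else solveB_loop (t ++ [S]) ((a, 1) :: (hh, c) :: rest) rB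
      by_cases hha : hh = a
      · -- equal heights: A pushes and bumps the count; B bumps the pair
        subst hha
        have hmh : m'.get? hh = some c := by rw [hm', lookB_cons]; simp
        have hgd : m'.getD hh 0 = c := by rw [PySem.Dict.getD_eq_get?_getD, hmh]; rfl
        have hpush : pushM m' hh = m'.insert hh (c + 1) := by
          rw [pushM, if_pos (by simp [contains_get, hmh]), hgd]
        have hflat2 : hh :: hh :: (List.replicate (c.toNat - 1) hh ++ flatS rest)
            = flatS ((hh, c + 1) :: rest) := by
          simp only [flatS, List.flatMap_cons]
          rw [show (c + 1).toNat = (c.toNat - 1) + 1 + 1 by omega, List.replicate_succ,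
            List.replicate_succ]
          simp
        rw [hflat, solveA_loop, if_pos (le_refl hh), hpush, if_pos (rfl : hh = hh), hflat2]
        refine ih ((hh, c + 1) :: rest) _ _ rA2 (rB + 2 * c) ⟨rfl, ?_, ?_, ?_⟩ ?_
          (fun x hx => hlS x (List.mem_cons_of_mem _ hx)) ?_
        · intro q hq
          rcases List.mem_cons.mp hq with h1 | h1
          · subst h1; omega
          · exact hcnt' q (List.mem_cons_of_mem _ h1)
        · intro x
          rw [PySem.Dict.get?_insert, lookB_cons]
          by_cases hx : x = hh
          · simp [hx]
          · rw [if_neg hx, if_neg (by omega), hm', lookB_cons, if_neg (by omega)]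
        · exact List.pairwise_cons.mpr ⟨(List.pairwise_cons.mp hpw').1, (List.pairwise_cons.mp hpw').2⟩
        · simp only [pend, List.map_cons, List.sum_cons] at hr2 ⊢
          have : (c + 1) * (c + 1 - 1) = c * (c - 1) + 2 * c := by ring
          omega
        · intro p hp
          rcases List.mem_cons.mp hp with h1 | h1
          · subst h1; exact hbS' (hh, c) (List.mem_cons_self ..)
          · exact hbS' p (List.mem_cons_of_mem _ h1)
      · -- strictly larger top: A pushes a fresh height; B pushes (a,1)
        have hlt : a < hh := by omega
        have hma : m'.get? a = none := by
          rw [hm', lookB_cons, if_neg (by omega)]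
          exact lookB_eq_none rest a
            (fun q hq => by have := (List.pairwise_cons.mp hpw').1 q hq; omega)
        have hpush : pushM m' a = m'.insert a 1 := by
          rw [pushM, if_neg (by simp [contains_get, hma])]
        rw [hflat, solveA_loop, if_pos hge, hpush, if_neg (by omega), ← hflat]
        have : a :: flatS ((hh, c) :: rest) = flatS ((a, 1) :: (hh, c) :: rest) := by
          simp [flatS]
        rw [this]
        refine ih ((a, 1) :: (hh, c) :: rest) _ _ rA2 rB ⟨rfl, ?_, ?_, ?_⟩ ?_
          (fun x hx => hlS x (List.mem_cons_of_mem _ hx)) ?_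
        · intro q hq
          rcases List.mem_cons.mp hq with h1 | h1
          · subst h1; omega
          · exact hcnt' q h1
        · intro x
          rw [PySem.Dict.get?_insert, lookB_cons]
          by_cases hx : x = a
          · simp [hx]
          · rw [if_neg hx, if_neg (by omega), hm']
        · refine List.pairwise_cons.mpr ⟨?_, hpw'⟩
          intro q hq
          rcases List.mem_cons.mp hq with h1 | h1
          · subst h1; exact hlt
          · have := (List.pairwise_cons.mp hpw').1 q h1; omega
        · simp only [pend, List.map_cons, List.sum_cons] at hr2 ⊢; omega
        · intro p hp
          rcases List.mem_cons.mp hp with h1 | h1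
          · subst h1; exact haS
          · exact hbS' p h1

-- ===== VERDICT (by name: the statement is the Claim_ definition above) =====
theorem solve_spec : Claim_equal_solve := by
  intro arr hdom
  unfold Spec_solve solve solve_alt
  refine mainLoop (2 ^ 64) arr [] [] PySem.Dict.empty 0 0
    ⟨rfl, by simp, fun h => rfl, by simp⟩ rfl ?_ (by simp)
  intro x hx
  have := List.all_eq_true.mp hdom x hx
  simp only [pvDomInt, decide_eq_true_eq] at this
  omega
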